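-- pv_equiv track=rewrite | github.com/Loofy147/Global-theorem- | research/frontier_discovery.py | _sa_score
-- ===== SOURCE A (Python) =====
-- def _sa_score(sigma, arc_s, pa, n, k):
--     total = 0
--     for c in range(k):
--         vis = bytearray(n); comps = 0
--         for s in range(n):
--             if not vis[s]:
--                 comps += 1; cur = s
--                 while not vis[cur]:
--                     vis[cur] = 1; pi = sigma[cur]
--                     cur = arc_s[cur][pa[pi][c]]
--         total += comps - 1
--     return total
-- ===== SOURCE B (Python) =====
-- def _sa_score(sigma, arc_s, pa, n, k):
--     # Declarative reachability formulation: per column build the successor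
--     # table, tabulate each node's forward orbit (n steps cover it all), and
--     # count the nodes not reachable from any smaller node.
--     total = 0
--     for c in range(k):
--         succ = [arc_s[s][pa[sigma[s]][c]] for s in range(n)]
--         orbits = []
--         for t in range(n):
--             o = []
--             cur = t
--             for _ in range(n):
--                 o.append(cur)
--                 cur = succ[cur]
--             orbits.append(o)
--         comps = sum(1 for s in range(n)
--                     if not any(s in orbits[t] for t in range(s)))
--         total += comps - 1
--     return total
-- ===== Notes on version B (the rewrite author's own statement) =====
-- stated objective: alternative
-- what changed: Replaces A's stateful visited-bitmap greedy walks by a declarative per-column reachability table: build the successor array, tabulate each node's n-step forward orbit, and count the nodes not reachable from any smaller node; same values, different algorithm (O(n^2) per column instead of O(n)).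
-- outside the precondition, e.g. on _sa_score([0, 0], [[-1], [0]], [[0]], 2, 1): A returns 0, B returns 1; on _sa_score([], [], [], -1, 1): A raises ValueError, B returns -1
import Mathlib
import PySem

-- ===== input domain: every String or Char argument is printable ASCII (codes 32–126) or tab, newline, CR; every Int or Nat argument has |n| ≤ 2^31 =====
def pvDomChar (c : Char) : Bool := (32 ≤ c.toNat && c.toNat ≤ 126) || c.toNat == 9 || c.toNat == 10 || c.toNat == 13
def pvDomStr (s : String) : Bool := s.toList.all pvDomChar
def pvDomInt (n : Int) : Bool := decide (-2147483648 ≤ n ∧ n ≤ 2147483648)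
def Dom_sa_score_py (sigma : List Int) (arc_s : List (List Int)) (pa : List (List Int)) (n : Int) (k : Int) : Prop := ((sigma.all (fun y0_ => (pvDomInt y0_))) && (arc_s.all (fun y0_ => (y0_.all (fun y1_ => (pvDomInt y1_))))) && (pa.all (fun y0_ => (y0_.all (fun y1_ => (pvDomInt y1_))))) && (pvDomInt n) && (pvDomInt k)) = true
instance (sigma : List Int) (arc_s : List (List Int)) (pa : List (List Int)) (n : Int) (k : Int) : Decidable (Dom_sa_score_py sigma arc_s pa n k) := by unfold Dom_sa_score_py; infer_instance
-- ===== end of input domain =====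

-- B replaces A's stateful visited-bitmap greedy walks by a declarative per-column
-- reachability table (successor array + n-step orbit lists) and counts the nodes not
-- reachable from any smaller node; objective: alternative (not faster).

-- ===== PORT A =====
-- the Python index expression arc_s[cur][pa[sigma[cur]][c]] (appears verbatim in both programs)
def saStep (sigma : List Int) (arc_s : List (List Int)) (pa : List (List Int)) (c : Int) (cur : Int) : Int :=
  PySem.List.pyGetD (PySem.List.pyGetD arc_s cur [])
    (PySem.List.pyGetD (PySem.List.pyGetD pa (PySem.List.pyGetD sigma cur 0) []) c 0) 0

-- A's `while not vis[cur]` loop; fuel n+1 always suffices on Pre_ inputs (each pass marks a fresh cell)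
def saWalk (sigma : List Int) (arc_s : List (List Int)) (pa : List (List Int)) (c : Int) : Nat → List Int → Int → List Int
  | 0, vis, _ => vis
  | fuel+1, vis, cur =>
      if PySem.List.pyGetD vis cur 1 = 0 then
        saWalk sigma arc_s pa c fuel (PySem.List.pySetD vis cur 1) (saStep sigma arc_s pa c cur)
      else vis

-- one column of A: vis = bytearray(n), greedy walks, returns comps
def saColA (sigma : List Int) (arc_s : List (List Int)) (pa : List (List Int)) (n : Int) (c : Int) : Int :=
  ((PySem.List.pyRange 0 n 1).foldl
    (fun (st : List Int × Int) s =>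
      if PySem.List.pyGetD st.1 s 1 = 0 then
        (saWalk sigma arc_s pa c (n.toNat + 1) st.1 s, st.2 + 1)
      else st)
    (List.replicate n.toNat 0, 0)).2

def sa_score_py (sigma : List Int) (arc_s : List (List Int)) (pa : List (List Int)) (n : Int) (k : Int) : Int :=
  (PySem.List.pyRange 0 k 1).foldl (fun total c => total + (saColA sigma arc_s pa n c - 1)) 0

-- ===== PORT B =====
-- Source B's inner `for _ in range(n): o.append(cur); cur = succ[cur]`
def sbOrbit (succ : List Int) : Nat → Int → List Int
  | 0, _ => []
  | fuel+1, cur => cur :: sbOrbit succ fuel (PySem.List.pyGetD succ cur 0)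

-- Source B's `succ = [arc_s[s][pa[sigma[s]][c]] for s in range(n)]`
def sbSucc (sigma : List Int) (arc_s : List (List Int)) (pa : List (List Int)) (n : Int) (c : Int) : List Int :=
  (PySem.List.pyRange 0 n 1).map (fun s => saStep sigma arc_s pa c s)

-- Source B's orbit table `orbits`
def sbOrbits (sigma : List Int) (arc_s : List (List Int)) (pa : List (List Int)) (n : Int) (c : Int) : List (List Int) :=
  (PySem.List.pyRange 0 n 1).map (fun t => sbOrbit (sbSucc sigma arc_s pa n c) n.toNat t)

-- one column of B: successor table, orbit table, count nodes unreachable from smaller ones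
def sbColB (sigma : List Int) (arc_s : List (List Int)) (pa : List (List Int)) (n : Int) (c : Int) : Int :=
  (PySem.List.pyRange 0 n 1).foldl
    (fun comps s =>
      if (PySem.List.pyRange 0 s 1).any
          (fun t => (PySem.List.pyGetD (sbOrbits sigma arc_s pa n c) t []).contains s) then comps
      else comps + 1)
    0

def sa_score_py_alt (sigma : List Int) (arc_s : List (List Int)) (pa : List (List Int)) (n : Int) (k : Int) : Int :=
  (PySem.List.pyRange 0 k 1).foldl (fun total c => total + (sbColB sigma arc_s pa n c - 1)) 0

-- ===== PRECONDITION & SPEC =====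
-- lookups used to state the precondition (plain list reads, no algorithm)
def preSig (sigma : List Int) (i : Nat) : Int := sigma.getD i 0
def preRow (sigma : List Int) (pa : List (List Int)) (i : Nat) : List Int := pa.getD (preSig sigma i).toNat []
def preJ (sigma : List Int) (pa : List (List Int)) (i c : Nat) : Int := (preRow sigma pa i).getD c 0
def preV (sigma : List Int) (arc_s : List (List Int)) (pa : List (List Int)) (i c : Nat) : Int :=
  (arc_s.getD i []).getD (preJ sigma pa i c).toNat 0

-- Pre_ excludes inputs with out-of-range or negative indices (A usually raises IndexError there,
-- and any value it does return rides on Python's negative-index wraparound, an accident of the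
-- encoding), and negative n with k > 0 (A raises ValueError at bytearray(n)).
def Pre_sa_score_py (sigma : List Int) (arc_s : List (List Int)) (pa : List (List Int)) (n : Int) (k : Int) : Prop :=
  k ≤ 0 ∨
  (0 ≤ n ∧ n.toNat ≤ sigma.length ∧ n.toNat ≤ arc_s.length ∧
   ∀ i, i < n.toNat →
     0 ≤ preSig sigma i ∧ (preSig sigma i).toNat < pa.length ∧
     ∀ c, c < k.toNat →
       c < (preRow sigma pa i).length ∧ 0 ≤ preJ sigma pa i c ∧
       (preJ sigma pa i c).toNat < (arc_s.getD i []).length ∧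
       0 ≤ preV sigma arc_s pa i c ∧ preV sigma arc_s pa i c < n)
instance (sigma : List Int) (arc_s : List (List Int)) (pa : List (List Int)) (n : Int) (k : Int) : Decidable (Pre_sa_score_py sigma arc_s pa n k) := by unfold Pre_sa_score_py; infer_instance

def pvWitness_sa_score_py : List Int × List (List Int) × List (List Int) × Int × Int :=
  ([0, 0], [[1], [1]], [[0]], 2, 1)

def Spec_sa_score_py (sigma : List Int) (arc_s : List (List Int)) (pa : List (List Int)) (n : Int) (k : Int) (out : Int) : Prop := out = sa_score_py_alt sigma arc_s pa n k
instance (sigma : List Int) (arc_s : List (List Int)) (pa : List (List Int)) (n : Int) (k : Int) (out : Int) : Decidable (Spec_sa_score_py sigma arc_s pa n k out) := by unfold Spec_sa_score_py; infer_instance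

-- ===== CLAIM (what is proved, stated in full; the proofs are below) =====
def Claim_equal_sa_score_py : Prop := ∀ (sigma : List Int) (arc_s : List (List Int)) (pa : List (List Int)) (n : Int) (k : Int), Dom_sa_score_py sigma arc_s pa n k → Pre_sa_score_py sigma arc_s pa n k → Spec_sa_score_py sigma arc_s pa n k (sa_score_py sigma arc_s pa n k)

-- ===== LEMMAS AND PROOFS =====

-- iterates of a self-map of [0,n) stay in [0,n)
theorem pvIterLt (f : ℕ → ℕ) (n : ℕ) (hf : ∀ v, v < n → f v < n) (t : ℕ) (ht : t < n) :
    ∀ m, f^[m] t < n := by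
  intro m; induction m with
  | zero => exact ht
  | succ m ih => rw [Function.iterate_succ_apply']; exact hf _ ih

-- once the trajectory repeats, every later value already occurred before the repeat
theorem pvIterRepeat (f : ℕ → ℕ) (t a b : ℕ) (hab : a < b) (h : f^[a] t = f^[b] t) :
    ∀ m, ∃ i, i < b ∧ f^[i] t = f^[m] t := by
  have shift : ∀ r, f^[a + r] t = f^[b + r] t := by
    intro r
    rw [Nat.add_comm a r, Nat.add_comm b r, Function.iterate_add_apply, Function.iterate_add_apply, h]
  intro m
  induction m using Nat.strong_induction_on with
  | _ m ih =>
    by_cases hm : m < b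
    · exact ⟨m, hm, rfl⟩
    · have hlt : m - (b - a) < m := by omega
      have key : f^[m] t = f^[m - (b - a)] t := by
        have h1 : f^[a + (m - b)] t = f^[b + (m - b)] t := shift (m - b)
        have h2 : b + (m - b) = m := by omega
        have h3 : a + (m - b) = m - (b - a) := by omega
        rw [h2, h3] at h1
        exact h1.symm
      obtain ⟨i, hi, he⟩ := ih _ hlt
      exact ⟨i, hi, by rw [he, key]⟩

-- pigeonhole: every reachable value is reached within n steps
theorem pvReachBound (f : ℕ → ℕ) (n : ℕ) (hf : ∀ v, v < n → f v < n) (t : ℕ) (ht : t < n) :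
    ∀ m, ∃ i, i < n ∧ f^[i] t = f^[m] t := by
  intro m
  by_cases hm : m < n
  · exact ⟨m, hm, rfl⟩
  · let g : Fin (n + 1) → Fin n := fun i => ⟨f^[i.1] t, pvIterLt f n hf t ht i.1⟩
    obtain ⟨x, y, hxy, he⟩ := Fintype.exists_ne_map_eq_of_card_lt g (by simp)
    have hval : f^[x.1] t = f^[y.1] t := congrArg Fin.val he
    rcases Nat.lt_or_ge x.1 y.1 with hlt | hge
    · obtain ⟨i, hi, he2⟩ := pvIterRepeat f t x.1 y.1 hlt hval m
      exact ⟨i, by omega, he2⟩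
    · have hlt : y.1 < x.1 := by
        rcases Nat.lt_or_ge y.1 x.1 with h | h
        · exact h
        · exact absurd (Fin.ext (by omega)) hxy
      obtain ⟨i, hi, he2⟩ := pvIterRepeat f t y.1 x.1 hlt hval.symm m
      exact ⟨i, by omega, he2⟩

-- number of unvisited cells
def zCount (n : ℕ) (vis : List Int) : ℕ :=
  (List.range n).countP (fun v => decide (vis.getD v 0 = 0))

theorem zCount_le (n : ℕ) (vis : List Int) : zCount n vis ≤ n := by
  have := List.countP_le_length (l := List.range n) (p := fun v => decide (vis.getD v 0 = 0))
  simpa [zCount] using this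

theorem getD_eq_getElem' (vis : List Int) (v : ℕ) (d : Int) (h : v < vis.length) :
    vis.getD v d = vis[v] := by
  simp [List.getD_eq_getElem?_getD, List.getElem?_eq_getElem h]

theorem zCount_set (n : ℕ) (vis : List Int) (cur : ℕ) (hc : cur < n) (hlen : vis.length = n)
    (h0 : vis.getD cur 0 = 0) : zCount n (vis.set cur 1) < zCount n vis := by
  have hsplit : List.range n = List.range cur ++ cur :: ((List.range (n - cur - 1)).map (fun x => cur + 1 + x)) := by
    have h1 : n = cur + (n - cur) := by omega
    have h2 : n - cur = (n - cur - 1) + 1 := by omega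
    calc List.range n = List.range (cur + (n - cur)) := by rw [← h1]
      _ = List.range cur ++ (List.range (n - cur)).map (fun x => cur + x) := by
            rw [List.range_add]
      _ = _ := by
            rw [h2, List.range_succ_eq_map]
            simp [List.map_map, Function.comp]
            exact fun a _ => by omega
  rw [zCount, zCount, hsplit]
  simp only [List.countP_append, List.countP_cons, List.countP_map]
  have hL : (List.range cur).countP (fun v => decide ((vis.set cur 1).getD v 0 = 0))
      = (List.range cur).countP (fun v => decide (vis.getD v 0 = 0)) := by
    apply List.countP_congr
    intro v hv
    have hv' : v < cur := List.mem_range.mp hv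
    have hvl : v < vis.length := by omega
    rw [getD_eq_getElem' _ _ _ (by simpa using hvl), getD_eq_getElem' _ _ _ hvl,
      List.getElem_set_ne (by omega)]
  have hR : ((List.range (n - cur - 1)).countP ((fun v => decide ((vis.set cur 1).getD v 0 = 0)) ∘ (fun x => cur + 1 + x)))
      = ((List.range (n - cur - 1)).countP ((fun v => decide (vis.getD v 0 = 0)) ∘ (fun x => cur + 1 + x))) := by
    apply List.countP_congr
    intro v hv
    have hv' : v < n - cur - 1 := List.mem_range.mp hv
    have hvl : cur + 1 + v < vis.length := by omega
    simp only [Function.comp]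
    rw [getD_eq_getElem' _ _ _ (by simpa using hvl), getD_eq_getElem' _ _ _ hvl,
      List.getElem_set_ne (by omega)]
  rw [hL, hR]
  have hcur1 : (vis.set cur 1).getD cur 0 = 1 := by
    rw [getD_eq_getElem' _ _ _ (by simpa using (hlen ▸ hc)), List.getElem_set_self (by simpa using (hlen ▸ hc))]
  rw [hcur1, h0]
  simp

-- the walk from f^[j] s, over a bitmap representing S0 ∪ {f^[i] s : i < j}, ends representing S0 ∪ Reach(s)
theorem pvWalkSpec (sigma : List Int) (arc_s : List (List Int)) (pa : List (List Int)) (c : Int)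
    (n' : ℕ) (f : ℕ → ℕ) (hf : ∀ v, v < n' → f v < n')
    (hstep : ∀ v, v < n' → saStep sigma arc_s pa c (v : Int) = ((f v : ℕ) : Int)) :
    ∀ (fuel : ℕ) (s j : ℕ) (vis : List Int) (S0 : ℕ → Prop),
      s < n' → (∀ v, S0 v → v < n') → (∀ v, S0 v → S0 (f v)) →
      vis.length = n' →
      (∀ v, v < n' → ((vis.getD v 0 ≠ 0) ↔ (S0 v ∨ ∃ i, i < j ∧ f^[i] s = v))) →
      zCount n' vis < fuel →
      (saWalk sigma arc_s pa c fuel vis ((f^[j] s : ℕ) : Int)).length = n' ∧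
      (∀ v, v < n' →
        (((saWalk sigma arc_s pa c fuel vis ((f^[j] s : ℕ) : Int)).getD v 0 ≠ 0) ↔
          (S0 v ∨ ∃ m, f^[m] s = v))) := by
  intro fuel
  induction fuel with
  | zero =>
    intro s j vis S0 _ _ _ _ _ hz
    exact absurd hz (Nat.not_lt_zero _)
  | succ fuel ih =>
    intro s j vis S0 hs hS0lt hS0cl hlen hrep hz
    have hcur : f^[j] s < n' := pvIterLt f n' hf s hs j
    have hlencur : f^[j] s < vis.length := by omega
    have hcond : PySem.List.pyGetD vis ((f^[j] s : ℕ) : Int) 1 = vis.getD (f^[j] s) 0 := by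
      rw [PySem.List.pyGetD_natCast, getD_eq_getElem' _ _ 1 hlencur, getD_eq_getElem' _ _ 0 hlencur]
    by_cases hv : vis.getD (f^[j] s) 0 = 0
    · rw [saWalk, hcond, if_pos hv, PySem.List.pySetD_natCast]
      have hstepeq : saStep sigma arc_s pa c ((f^[j] s : ℕ) : Int) = ((f^[j+1] s : ℕ) : Int) := by
        rw [hstep _ hcur, Function.iterate_succ_apply']
      rw [hstepeq]
      apply ih s (j+1) (vis.set (f^[j] s) 1) S0 hs hS0lt hS0cl (by simpa using hlen)
      · intro v hvn
        by_cases hvc : v = f^[j] s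
        · have h1 : (vis.set (f^[j] s) 1).getD v 0 = 1 := by
            rw [hvc, getD_eq_getElem' _ _ 0 (by simpa using hlencur), List.getElem_set_self (by simpa using hlencur)]
          rw [h1]
          exact iff_of_true (by norm_num) (Or.inr ⟨j, Nat.lt_succ_self j, hvc.symm⟩)
        · have h1 : (vis.set (f^[j] s) 1).getD v 0 = vis.getD v 0 := by
            rw [getD_eq_getElem' _ _ 0 (by simp; omega), getD_eq_getElem' _ _ 0 (by omega),
              List.getElem_set_ne (by omega)]
          rw [h1, hrep v hvn]
          constructor
          · rintro (h | ⟨i, hi, he⟩)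
            · exact Or.inl h
            · exact Or.inr ⟨i, by omega, he⟩
          · rintro (h | ⟨i, hi, he⟩)
            · exact Or.inl h
            · rcases Nat.lt_or_ge i j with h2 | h2
              · exact Or.inr ⟨i, h2, he⟩
              · have : i = j := by omega
                subst this
                exact absurd he.symm hvc
      · have h1 := zCount_set n' vis (f^[j] s) hcur hlen hv
        omega
    · rw [saWalk, hcond, if_neg hv]
      have hin : S0 (f^[j] s) ∨ ∃ i, i < j ∧ f^[i] s = f^[j] s := (hrep _ hcur).mp hv
      have hS0iter : ∀ (r : ℕ) (x : ℕ), S0 x → S0 (f^[r] x) := by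
        intro r
        induction r with
        | zero => exact fun x h => h
        | succ r ihr =>
          intro x h
          rw [Function.iterate_succ_apply']
          exact hS0cl _ (ihr x h)
      refine ⟨hlen, fun v hvn => ?_⟩
      rw [hrep v hvn]
      constructor
      · rintro (h | ⟨i, _, he⟩)
        · exact Or.inl h
        · exact Or.inr ⟨i, he⟩
      · rintro (h | ⟨m, he⟩)
        · exact Or.inl h
        · rcases hin with hS | ⟨a, haj, heq⟩
          · by_cases hmj : m < j
            · exact Or.inr ⟨m, hmj, he⟩
            · left
              have hm : m = (m - j) + j := by omega
              have hiter : f^[m] s = f^[m - j] (f^[j] s) := by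
                conv_lhs => rw [hm]
                rw [Function.iterate_add_apply]
              rw [← he, hiter]
              exact hS0iter _ _ hS
          · obtain ⟨i, hij, he2⟩ := pvIterRepeat f s a j haj heq m
            exact Or.inr ⟨i, hij, by rw [he2, he]⟩


-- bounded non-reachability predicate shared by both column characterizations
def pNR (f : ℕ → ℕ) (n' : ℕ) (s' : ℕ) : Bool :=
  decide (∀ t, t < s' → ∀ i, i < n' → f^[i] t ≠ s')

-- A's outer loop invariant
theorem pvLoopA (sigma : List Int) (arc_s : List (List Int)) (pa : List (List Int)) (c : Int)
    (n : Int) (n' : ℕ) (hn : n = (n' : Int)) (f : ℕ → ℕ) (hf : ∀ v, v < n' → f v < n')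
    (hstep : ∀ v, v < n' → saStep sigma arc_s pa c (v : Int) = ((f v : ℕ) : Int)) :
    ∀ (d a' : ℕ), a' + d = n' → ∀ (vis : List Int) (comps : Int),
      vis.length = n' →
      (∀ v, v < n' → ((vis.getD v 0 ≠ 0) ↔ ∃ t, t < a' ∧ ∃ m, f^[m] t = v)) →
      (((PySem.List.pyRange (a' : Int) n 1).foldl
        (fun (st : List Int × Int) s =>
          if PySem.List.pyGetD st.1 s 1 = 0 then
            (saWalk sigma arc_s pa c (n.toNat + 1) st.1 s, st.2 + 1)
          else st) (vis, comps)).2)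
        = comps + ((List.range' a' d).countP (pNR f n') : Int) := by
  intro d
  induction d with
  | zero =>
    intro a' ha vis comps hlen hrep
    have hnil : (PySem.List.pyRange (a' : Int) n 1) = [] := by
      apply PySem.List.pyRange_one_eq_nil
      rw [hn]
      exact_mod_cast Nat.le_of_eq (by omega)
    rw [hnil]
    simp
  | succ d ihd =>
    intro a' ha vis comps hlen hrep
    have ha' : a' < n' := by omega
    have hlt : ((a' : Int)) < n := by rw [hn]; exact_mod_cast ha'
    have hcast : ((a' : Int) + 1) = ((a' + 1 : ℕ) : Int) := by push_cast; ring
    rw [PySem.List.pyRange_one_cons hlt, hcast, List.foldl_cons]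
    have hcond : PySem.List.pyGetD vis ((a' : ℕ) : Int) 1 = vis.getD a' 0 := by
      rw [PySem.List.pyGetD_natCast, getD_eq_getElem' _ _ 1 (by omega), getD_eq_getElem' _ _ 0 (by omega)]
    have hrange' : List.range' a' (d + 1) = a' :: List.range' (a' + 1) d := List.range'_succ
    rw [hrange', List.countP_cons]
    dsimp only
    rw [hcond]
    by_cases hv : vis.getD a' 0 = 0
    · rw [if_pos hv]
      have hnr : pNR f n' a' = true := by
        have hns : ¬ (∃ t, t < a' ∧ ∃ m, f^[m] t = a') := by
          intro hc
          exact ((hrep a' ha').mpr hc) hv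
        rw [pNR, decide_eq_true_iff]
        intro t ht i _ he
        exact hns ⟨t, ht, i, he⟩
      have hn' : n.toNat = n' := by rw [hn]; exact Int.toNat_natCast n'
      have hws := pvWalkSpec sigma arc_s pa c n' f hf hstep (n.toNat + 1) a' 0 vis
        (fun v => ∃ t, t < a' ∧ ∃ m, f^[m] t = v) ha'
        (fun v hv2 => by
          obtain ⟨t, ht, m, hm⟩ := hv2
          rw [← hm]
          exact pvIterLt f n' hf t (by omega) m)
        (fun v hv2 => by
          obtain ⟨t, ht, m, hm⟩ := hv2
          exact ⟨t, ht, m + 1, by rw [Function.iterate_succ_apply', hm]⟩)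
        hlen
        (fun v hvn => by
          rw [hrep v hvn]
          constructor
          · exact fun h => Or.inl h
          · rintro (h | ⟨i, hi, _⟩)
            · exact h
            · omega)
        (by have := zCount_le n' vis; omega)
      rw [Function.iterate_zero_apply] at hws
      rw [ihd (a' + 1) (by omega) _ (comps + 1) hws.1
        (fun v hvn => by
          rw [hws.2 v hvn]
          constructor
          · rintro (⟨t, ht, m, hm⟩ | ⟨m, hm⟩)
            · exact ⟨t, by omega, m, hm⟩
            · exact ⟨a', by omega, m, hm⟩
          · rintro ⟨t, ht, m, hm⟩
            rcases Nat.lt_or_ge t a' with h2 | h2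
            · exact Or.inl ⟨t, h2, m, hm⟩
            · have : t = a' := by omega
              subst this
              exact Or.inr ⟨m, hm⟩)]
      rw [hnr]
      simp only [if_pos rfl]
      push_cast
      ring
    · rw [if_neg hv]
      have hS0 : ∃ t, t < a' ∧ ∃ m, f^[m] t = a' := (hrep a' ha').mp hv
      have hnr : pNR f n' a' = false := by
        obtain ⟨t, ht, m, hm⟩ := hS0
        obtain ⟨i, hi, he⟩ := pvReachBound f n' hf t (by omega) m
        rw [pNR]
        simp only [decide_eq_false_iff_not]
        intro hall
        exact hall t ht i hi (by rw [he, hm])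
      rw [ihd (a' + 1) (by omega) vis comps hlen
        (fun v hvn => by
          rw [hrep v hvn]
          constructor
          · rintro ⟨t, ht, m, hm⟩
            exact ⟨t, by omega, m, hm⟩
          · rintro ⟨t, ht, m, hm⟩
            rcases Nat.lt_or_ge t a' with h2 | h2
            · exact ⟨t, h2, m, hm⟩
            · have : t = a' := by omega
              subst this
              obtain ⟨t0, ht0, m0, hm0⟩ := hS0
              refine ⟨t0, ht0, m + m0, ?_⟩
              rw [Function.iterate_add_apply, hm0, hm])]
      rw [hnr]
      push_cast
      ring


theorem pvColA (sigma : List Int) (arc_s : List (List Int)) (pa : List (List Int)) (c : Int)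
    (n : Int) (n' : ℕ) (hn : n = (n' : Int)) (f : ℕ → ℕ) (hf : ∀ v, v < n' → f v < n')
    (hstep : ∀ v, v < n' → saStep sigma arc_s pa c (v : Int) = ((f v : ℕ) : Int)) :
    saColA sigma arc_s pa n c = ((List.range n').countP (pNR f n') : Int) := by
  have hrep0 : ∀ v, v < n' → (((List.replicate n.toNat (0 : Int)).getD v 0 ≠ 0) ↔
      ∃ t, t < 0 ∧ ∃ m, f^[m] t = v) := by
    intro v _
    have hz : (List.replicate n.toNat (0 : Int)).getD v 0 = 0 := by
      rcases Nat.lt_or_ge v n.toNat with h | h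
      · rw [getD_eq_getElem' _ _ 0 (by simpa using h), List.getElem_replicate]
      · rw [List.getD_eq_getElem?_getD, List.getElem?_eq_none (by simpa using h)]
        rfl
    rw [hz]
    constructor
    · intro h; exact absurd rfl h
    · rintro ⟨t, ht, _⟩; omega
  have hlen0 : (List.replicate n.toNat (0 : Int)).length = n' := by
    rw [List.length_replicate, hn]
    exact Int.toNat_natCast n'
  have hmain := pvLoopA sigma arc_s pa c n n' hn f hf hstep n' 0 (by omega)
    (List.replicate n.toNat 0) 0 hlen0 hrep0
  norm_num at hmain
  rw [saColA, hmain, List.range_eq_range']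

-- B side: orbit membership
theorem pvOrbitMem (succ : List Int) (n' : ℕ) (f : ℕ → ℕ) (hf : ∀ v, v < n' → f v < n')
    (hsucc : ∀ v, v < n' → PySem.List.pyGetD succ (v : Int) 0 = ((f v : ℕ) : Int)) :
    ∀ (fuel : ℕ) (t : ℕ), t < n' → ∀ (x : Int),
      (x ∈ sbOrbit succ fuel ((t : ℕ) : Int) ↔ ∃ i, i < fuel ∧ x = ((f^[i] t : ℕ) : Int)) := by
  intro fuel
  induction fuel with
  | zero =>
    intro t ht x
    simp [sbOrbit]
  | succ fuel ih =>
    intro t ht x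
    rw [sbOrbit, hsucc t ht, List.mem_cons, ih (f t) (hf t ht) x]
    constructor
    · rintro (h | ⟨i, hi, he⟩)
      · exact ⟨0, Nat.succ_pos _, by simpa using h⟩
      · exact ⟨i + 1, by omega, by rw [he, Function.iterate_succ_apply]⟩
    · rintro ⟨i, hi, he⟩
      cases i with
      | zero => exact Or.inl (by simpa using he)
      | succ i => exact Or.inr ⟨i, by omega, by rw [he, Function.iterate_succ_apply]⟩

-- a foldl that adds 1 exactly when q fails is a countP of !q
theorem pvFoldIf (q : ℕ → Bool) : ∀ (l : List ℕ) (init : Int),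
    l.foldl (fun acc x => if q x = true then acc else acc + 1) init
      = init + ((l.countP (fun x => !q x) : ℕ) : Int) := by
  intro l
  induction l with
  | nil => intro init; simp
  | cons x l ihl =>
    intro init
    rw [List.foldl_cons, List.countP_cons, ihl]
    cases hq : q x
    · norm_num [hq]
      ring
    · norm_num [hq]

theorem pvColB (sigma : List Int) (arc_s : List (List Int)) (pa : List (List Int)) (c : Int)
    (n : Int) (n' : ℕ) (hn : n = (n' : Int)) (f : ℕ → ℕ) (hf : ∀ v, v < n' → f v < n')
    (hstep : ∀ v, v < n' → saStep sigma arc_s pa c (v : Int) = ((f v : ℕ) : Int)) :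
    sbColB sigma arc_s pa n c = ((List.range n').countP (pNR f n') : Int) := by
  have hn' : n.toNat = n' := by rw [hn]; exact Int.toNat_natCast n'
  have hsucc : ∀ v, v < n' → PySem.List.pyGetD (sbSucc sigma arc_s pa n c) ((v : ℕ) : Int) 0 = ((f v : ℕ) : Int) := by
    intro v hv
    rw [sbSucc, hn, PySem.List.pyGetD_map_pyRange _ n' v 0 hv]
    exact hstep v hv
  have horb : ∀ t, t < n' → PySem.List.pyGetD (sbOrbits sigma arc_s pa n c) ((t : ℕ) : Int) []
      = sbOrbit (sbSucc sigma arc_s pa n c) n.toNat ((t : ℕ) : Int) := by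
    intro t ht
    rw [sbOrbits,
      show (PySem.List.pyRange 0 n 1) = (PySem.List.pyRange 0 ((n' : ℕ) : Int) 1) from by rw [hn],
      PySem.List.pyGetD_map_pyRange _ n' t [] ht]
  have hQ : ∀ s', s' < n' →
      ((PySem.List.pyRange 0 ((s' : ℕ) : Int) 1).any
        (fun t => (PySem.List.pyGetD (sbOrbits sigma arc_s pa n c) t []).contains ((s' : ℕ) : Int)))
      = !(pNR f n' s') := by
    intro s' hs
    rw [Bool.eq_iff_iff]
    rw [PySem.List.pyRange_zero_nat s', List.any_map, List.any_eq_true]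
    constructor
    · rintro ⟨t', ht', hc2⟩
      have ht'2 : t' < s' := List.mem_range.mp ht'
      simp only [Function.comp] at hc2
      rw [horb t' (by omega), hn'] at hc2
      have := (pvOrbitMem (sbSucc sigma arc_s pa n c) n' f hf hsucc n' t' (by omega) _).mp
        (List.contains_iff_mem.mp hc2)
      obtain ⟨i, hi, he⟩ := this
      simp only [pNR, Bool.not_eq_true', decide_eq_false_iff_not]
      intro hall
      exact hall t' ht'2 i hi (by exact_mod_cast he.symm)
    · intro hnp
      simp only [pNR, Bool.not_eq_true', decide_eq_false_iff_not] at hnp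
      push_neg at hnp
      obtain ⟨t', ht', i, hi, he⟩ := hnp
      refine ⟨t', List.mem_range.mpr ht', ?_⟩
      simp only [Function.comp]
      rw [horb t' (by omega), hn']
      apply List.contains_iff_mem.mpr
      apply (pvOrbitMem (sbSucc sigma arc_s pa n c) n' f hf hsucc n' t' (by omega) _).mpr
      exact ⟨i, hi, by exact_mod_cast he.symm⟩
  rw [sbColB,
    show (PySem.List.pyRange 0 n 1) = (List.range n').map (fun k => ((k : ℕ) : Int)) from by
      rw [hn]; exact PySem.List.pyRange_zero_nat n',
    List.foldl_map]
  have hfold := pvFoldIf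
    (fun x => (PySem.List.pyRange 0 ((x : ℕ) : Int) 1).any
      (fun t => (PySem.List.pyGetD (sbOrbits sigma arc_s pa n c) t []).contains ((x : ℕ) : Int)))
    (List.range n') 0
  rw [hfold]
  have hcnt : (List.range n').countP
      (fun x => !((PySem.List.pyRange 0 ((x : ℕ) : Int) 1).any
        (fun t => (PySem.List.pyGetD (sbOrbits sigma arc_s pa n c) t []).contains ((x : ℕ) : Int))))
      = (List.range n').countP (pNR f n') := by
    apply List.countP_congr
    intro x hx
    rw [hQ x (List.mem_range.mp hx), Bool.not_not]
  rw [hcnt]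
  ring

-- unfolding saStep under the precondition
theorem pvStepEq (sigma : List Int) (arc_s : List (List Int)) (pa : List (List Int))
    (i c' : ℕ) (hlen : i < sigma.length) (harc : i < arc_s.length)
    (h1 : 0 ≤ preSig sigma i) (h2 : (preSig sigma i).toNat < pa.length)
    (h3 : c' < (preRow sigma pa i).length) (h4 : 0 ≤ preJ sigma pa i c')
    (h5 : (preJ sigma pa i c').toNat < (arc_s.getD i []).length) :
    saStep sigma arc_s pa (c' : Int) (i : Int) = preV sigma arc_s pa i c' := by
  have e1 : PySem.List.pyGetD sigma (i : Int) 0 = preSig sigma i := by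
    rw [PySem.List.pyGetD_natCast]; rfl
  have e2 : PySem.List.pyGetD pa (preSig sigma i) [] = preRow sigma pa i := by
    rw [show preSig sigma i = (((preSig sigma i).toNat : ℕ) : Int) from (Int.toNat_of_nonneg h1).symm,
      PySem.List.pyGetD_natCast]
    rfl
  have e3 : PySem.List.pyGetD (preRow sigma pa i) ((c' : ℕ) : Int) 0 = preJ sigma pa i c' := by
    rw [PySem.List.pyGetD_natCast]; rfl
  have e4 : PySem.List.pyGetD arc_s ((i : ℕ) : Int) [] = arc_s.getD i [] := by
    rw [PySem.List.pyGetD_natCast]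
  have e5 : PySem.List.pyGetD (arc_s.getD i []) (preJ sigma pa i c') 0 = preV sigma arc_s pa i c' := by
    rw [show preJ sigma pa i c' = (((preJ sigma pa i c').toNat : ℕ) : Int) from (Int.toNat_of_nonneg h4).symm,
      PySem.List.pyGetD_natCast]
    rfl
  rw [saStep, e1, e2, e3, e4, e5]

theorem pvColEq (sigma : List Int) (arc_s : List (List Int)) (pa : List (List Int))
    (n k : Int)
    (hWF : 0 ≤ n ∧ n.toNat ≤ sigma.length ∧ n.toNat ≤ arc_s.length ∧
      ∀ i, i < n.toNat →
        0 ≤ preSig sigma i ∧ (preSig sigma i).toNat < pa.length ∧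
        ∀ c, c < k.toNat →
          c < (preRow sigma pa i).length ∧ 0 ≤ preJ sigma pa i c ∧
          (preJ sigma pa i c).toNat < (arc_s.getD i []).length ∧
          0 ≤ preV sigma arc_s pa i c ∧ preV sigma arc_s pa i c < n)
    (c' : ℕ) (hc : c' < k.toNat) :
    saColA sigma arc_s pa n (c' : Int) = sbColB sigma arc_s pa n (c' : Int) := by
  obtain ⟨hn0, hsig, harc, hidx⟩ := hWF
  have hn : n = ((n.toNat : ℕ) : Int) := (Int.toNat_of_nonneg hn0).symm
  have hstep : ∀ v, v < n.toNat → saStep sigma arc_s pa ((c' : ℕ) : Int) ((v : ℕ) : Int)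
      = (((fun v => (preV sigma arc_s pa v c').toNat) v : ℕ) : Int) := by
    intro v hv
    obtain ⟨h1, h2, hcs⟩ := hidx v hv
    obtain ⟨h3, h4, h5, h6, h7⟩ := hcs c' hc
    rw [pvStepEq sigma arc_s pa v c' (by omega) (by omega) h1 h2 h3 h4 h5]
    exact (Int.toNat_of_nonneg h6).symm
  have hf : ∀ v, v < n.toNat → (fun v => (preV sigma arc_s pa v c').toNat) v < n.toNat := by
    intro v hv
    obtain ⟨h1, h2, hcs⟩ := hidx v hv
    obtain ⟨h3, h4, h5, h6, h7⟩ := hcs c' hc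
    simp only
    omega
  rw [pvColA sigma arc_s pa ((c' : ℕ) : Int) n n.toNat hn _ hf hstep,
    pvColB sigma arc_s pa ((c' : ℕ) : Int) n n.toNat hn _ hf hstep]

-- ===== VERDICT (by name: the statement is the Claim_ definition above) =====
theorem pvFoldCongr (l : List Int) (F G : Int → Int → Int)
    (h : ∀ x ∈ l, ∀ acc, F acc x = G acc x) :
    ∀ init, l.foldl F init = l.foldl G init := by
  induction l with
  | nil => intro _; rfl
  | cons x l ihl =>
    intro init
    rw [List.foldl_cons, List.foldl_cons, h x List.mem_cons_self init]
    exact ihl (fun y hy acc => h y (List.mem_cons_of_mem _ hy) acc) _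

theorem sa_score_py_spec : Claim_equal_sa_score_py := by
  intro sigma arc_s pa n k _ hpre
  unfold Spec_sa_score_py sa_score_py sa_score_py_alt
  apply pvFoldCongr
  intro x hx acc
  obtain ⟨hx0, hxk⟩ := (PySem.List.mem_pyRange_one).mp hx
  rcases hpre with hk | hWF
  · omega
  · have hxc : ((x.toNat : ℕ) : Int) = x := Int.toNat_of_nonneg hx0
    have hck : x.toNat < k.toNat := by omega
    have hcol := pvColEq sigma arc_s pa n k hWF x.toNat hck
    rw [← hxc, hcol]
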